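-- pv_equiv track=rewrite | github.com/matthewsilva/Simple-Python-Programs | Bioinformatics Gene Comparator/MatthewSilvaCSC110_Assignment_11_Bioinformatics.py | optimalScores
-- ===== SOURCE A (Python) =====
-- def optimalScores(scores, alignments):
--     optScores = []  # Initializes the new lists of optimal scores and alignments
--     optAligns = []
--     maxVal = scores[0]
--     for i in range(len(scores)):    # Find the maximum score
--         if scores[i] > maxVal:
--             maxVal = scores[i]
--     for i in range(len(scores)):
--         if scores[i] == maxVal: # If a score is the maximum...
--             optScores.append(scores[i]) # Add the score to an array...
--             optAligns.append(alignments[i]) # And add the alignment to an array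
--     return optScores, optAligns
-- ===== SOURCE B (Python) =====
-- def optimalScores(scores, alignments):
--     maxVal = scores[0]
--     optScores = []
--     optAligns = []
--     for i in range(len(scores)):
--         s = scores[i]
--         if s > maxVal:
--             maxVal = s
--             optScores = [s]
--             optAligns = [alignments[i]]
--         elif s == maxVal:
--             optScores.append(s)
--             optAligns.append(alignments[i])
--     return optScores, optAligns
-- ===== Notes on version B (the rewrite author's own statement) =====
-- stated objective: alternative
-- what changed: Fused A's two scans (max-finding pass then collection pass) into one pass that keeps a running maximum and resets/extends the tied-score and alignment accumulators on the fly.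
import Mathlib
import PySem

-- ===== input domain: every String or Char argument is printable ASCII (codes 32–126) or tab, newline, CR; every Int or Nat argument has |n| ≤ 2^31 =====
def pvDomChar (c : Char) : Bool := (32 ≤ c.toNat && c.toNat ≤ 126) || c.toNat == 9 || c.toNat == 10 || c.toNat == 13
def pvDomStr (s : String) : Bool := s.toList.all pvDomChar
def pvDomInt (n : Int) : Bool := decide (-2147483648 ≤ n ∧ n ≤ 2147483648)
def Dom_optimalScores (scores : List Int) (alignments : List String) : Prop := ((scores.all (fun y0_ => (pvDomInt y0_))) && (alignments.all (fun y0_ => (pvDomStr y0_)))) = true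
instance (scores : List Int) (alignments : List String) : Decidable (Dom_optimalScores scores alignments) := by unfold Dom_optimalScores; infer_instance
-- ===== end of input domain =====

-- B fuses A's two scans (find max, then collect ties) into one pass with a running max that
-- resets the accumulators; same return value everywhere A returns (objective: alternative).

-- ===== PORT A =====
-- A: maxVal = scores[0]; first loop over range(len(scores)) finds the max;
-- second loop collects scores[i] == maxVal together with alignments[i].
def optimalScores (scores : List Int) (alignments : List String) : List Int × List String :=
  let maxVal :=
    (List.range scores.length).foldl
      (fun m i => if scores.getD i 0 > m then scores.getD i 0 else m)
      (scores.getD 0 0)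
  (List.range scores.length).foldl
    (fun acc i =>
      if scores.getD i 0 = maxVal then
        (acc.1 ++ [scores.getD i 0], acc.2 ++ [alignments.getD i ""])
      else acc)
    ([], [])

-- ===== PORT B =====
-- B's single loop: running max m, accumulators os/oa; '>' resets, '==' appends.
-- alignments[i] is read through the parallel tail (headD) — same value as alignments.getD i.
def optimalScoresAltLoop (m : Int) (os : List Int) (oa : List String) :
    List Int → List String → List Int × List String
  | [], _ => (os, oa)
  | x :: xs, a =>
    if x > m then optimalScoresAltLoop x [x] [a.headD ""] xs a.tail
    else if x = m then optimalScoresAltLoop m (os ++ [x]) (oa ++ [a.headD ""]) xs a.tail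
    else optimalScoresAltLoop m os oa xs a.tail

def optimalScores_alt (scores : List Int) (alignments : List String) : List Int × List String :=
  match scores with
  | [] => ([], [])   -- Python B raises IndexError here (outside Pre_)
  | s0 :: _ => optimalScoresAltLoop s0 [] [] scores alignments

-- ===== PRECONDITION & SPEC =====
-- Pre_ excludes exactly the inputs where Python A raises IndexError: empty scores, and
-- inputs where some index holding the maximal score is out of range for alignments.
def Pre_optimalScores (scores : List Int) (alignments : List String) : Prop :=
  scores ≠ [] ∧
  ∀ i < scores.length, alignments.length ≤ i →
    ∃ j < scores.length, scores.getD i 0 < scores.getD j 0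
instance (scores : List Int) (alignments : List String) : Decidable (Pre_optimalScores scores alignments) := by
  unfold Pre_optimalScores; infer_instance
def pvWitness_optimalScores : List Int × List String := ([1, 3, 3], ["a", "b", "c"])
def Spec_optimalScores (scores : List Int) (alignments : List String) (out : List Int × List String) : Prop := out = optimalScores_alt scores alignments
instance (scores : List Int) (alignments : List String) (out : List Int × List String) : Decidable (Spec_optimalScores scores alignments out) := by unfold Spec_optimalScores; infer_instance

-- ===== CLAIM (what is proved, stated in full; the proofs are below) =====
def Claim_equal_optimalScores : Prop := ∀ (scores : List Int) (alignments : List String), Dom_optimalScores scores alignments → Pre_optimalScores scores alignments → Spec_optimalScores scores alignments (optimalScores scores alignments)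

-- ===== LEMMAS AND PROOFS =====

-- running max over a list
def pvMaxf (m : Int) (l : List Int) : Int :=
  l.foldl (fun m x => if x > m then x else m) m

-- reference: ties of M in l, with parallel alignments read through headD/tail
def pvFilt (M : Int) : List Int → List String → List Int × List String
  | [], _ => ([], [])
  | x :: xs, a =>
    if x = M then
      ((x :: (pvFilt M xs a.tail).1), (a.headD "" :: (pvFilt M xs a.tail).2))
    else pvFilt M xs a.tail

theorem pvGetD_succ_tail {α : Type} (a : List α) (i : Nat) (d : α) :
    a.getD (i + 1) d = a.tail.getD i d := by
  cases a <;> simp [List.getD]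

-- A's first loop is pvMaxf
theorem pvMaxLoop_eq (l : List Int) (c : Int) :
    (List.range l.length).foldl (fun m i => if l.getD i 0 > m then l.getD i 0 else m) c
      = pvMaxf c l := by
  induction l generalizing c with
  | nil => simp [pvMaxf]
  | cons x xs ih =>
    simp only [List.length_cons, List.range_succ_eq_map, List.foldl_cons, List.foldl_map,
      List.getD_cons_zero, List.getD_cons_succ, pvMaxf, List.foldl_cons]
    exact ih _

-- A's second loop equals the reference with accumulated prefix
theorem pvCollect_eq (M : Int) (l : List Int) (a : List String) (acc : List Int × List String) :
    (List.range l.length).foldl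
        (fun acc i => if l.getD i 0 = M then (acc.1 ++ [l.getD i 0], acc.2 ++ [a.getD i ""]) else acc)
        acc
      = (acc.1 ++ (pvFilt M l a).1, acc.2 ++ (pvFilt M l a).2) := by
  induction l generalizing a acc with
  | nil => simp [pvFilt]
  | cons x xs ih =>
    simp only [List.length_cons, List.range_succ_eq_map, List.foldl_cons, List.foldl_map,
      List.getD_cons_zero, List.getD_cons_succ, pvFilt]
    have hg : ∀ i : Nat, a.getD (i + 1) "" = a.tail.getD i "" := fun i => pvGetD_succ_tail a i ""
    by_cases hx : x = M
    · simp only [if_pos hx]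
      rw [show (fun (acc : List Int × List String) (i : Nat) =>
            if xs.getD i 0 = M then (acc.1 ++ [xs.getD i 0], acc.2 ++ [a.getD (i+1) ""]) else acc)
          = (fun acc i =>
            if xs.getD i 0 = M then (acc.1 ++ [xs.getD i 0], acc.2 ++ [a.tail.getD i ""]) else acc)
          from funext fun acc => funext fun i => by rw [hg i]]
      rw [ih a.tail]
      cases a <;> simp [hx]
    · simp only [if_neg hx]
      rw [show (fun (acc : List Int × List String) (i : Nat) =>
            if xs.getD i 0 = M then (acc.1 ++ [xs.getD i 0], acc.2 ++ [a.getD (i+1) ""]) else acc)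
          = (fun acc i =>
            if xs.getD i 0 = M then (acc.1 ++ [xs.getD i 0], acc.2 ++ [a.tail.getD i ""]) else acc)
          from funext fun acc => funext fun i => by rw [hg i]]
      rw [ih a.tail]

theorem pvMaxf_le (m : Int) (l : List Int) : m ≤ pvMaxf m l := by
  induction l generalizing m with
  | nil => simp [pvMaxf]
  | cons x xs ih =>
    simp only [pvMaxf, List.foldl_cons]
    by_cases h : x > m
    · simp only [if_pos h]
      exact le_trans (le_of_lt h) (ih x)
    · simp only [if_neg h]
      exact ih m

-- B's loop characterized by the reference
theorem pvAltLoop_char (l : List Int) :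
    ∀ (a : List String) (m : Int) (os : List Int) (oa : List String),
    optimalScoresAltLoop m os oa l a =
      if pvMaxf m l = m
      then (os ++ (pvFilt m l a).1, oa ++ (pvFilt m l a).2)
      else pvFilt (pvMaxf m l) l a := by
  induction l with
  | nil => intro a m os oa; simp [optimalScoresAltLoop, pvMaxf, pvFilt]
  | cons x xs ih =>
    intro a m os oa
    have hstep : pvMaxf m (x :: xs) = pvMaxf (if x > m then x else m) xs := by
      simp [pvMaxf]
    by_cases h1 : x > m
    · -- reset branch
      have hM : pvMaxf m (x :: xs) = pvMaxf x xs := by rw [hstep, if_pos h1]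
      have hne : pvMaxf m (x :: xs) ≠ m := by
        rw [hM]; intro h
        exact absurd (h ▸ pvMaxf_le x xs) (not_le.mpr h1)
      rw [show optimalScoresAltLoop m os oa (x :: xs) a
            = optimalScoresAltLoop x [x] [a.headD ""] xs a.tail from by
          simp [optimalScoresAltLoop, h1]]
      rw [ih a.tail x [x] [a.headD ""], if_neg hne, hM]
      by_cases h2 : pvMaxf x xs = x
      · rw [if_pos h2, h2]
        simp [pvFilt]
      · rw [if_neg h2]
        have hxne : x ≠ pvMaxf x xs := fun h => h2 h.symm
        simp [pvFilt, hxne]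
    · by_cases h2 : x = m
      · -- append branch
        have hM : pvMaxf m (x :: xs) = pvMaxf m xs := by rw [hstep, if_neg h1]
        rw [show optimalScoresAltLoop m os oa (x :: xs) a
              = optimalScoresAltLoop m (os ++ [x]) (oa ++ [a.headD ""]) xs a.tail from by
            simp [optimalScoresAltLoop, h2]]
        rw [ih a.tail m (os ++ [x]) (oa ++ [a.headD ""]), hM]
        by_cases h3 : pvMaxf m xs = m
        · rw [if_pos h3, if_pos h3]
          simp [pvFilt, h2]
        · rw [if_neg h3, if_neg h3]
          have hxne : x ≠ pvMaxf m xs := by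
            rw [h2]; intro h; exact h3 h.symm
          simp [pvFilt, hxne]
      · -- skip branch
        have hM : pvMaxf m (x :: xs) = pvMaxf m xs := by rw [hstep, if_neg h1]
        rw [show optimalScoresAltLoop m os oa (x :: xs) a
              = optimalScoresAltLoop m os oa xs a.tail from by
            simp [optimalScoresAltLoop, h1, h2]]
        rw [ih a.tail m os oa, hM]
        have hxlt : x < pvMaxf m xs :=
          lt_of_lt_of_le (lt_of_le_of_ne (not_lt.mp h1) h2) (pvMaxf_le m xs)
        by_cases h3 : pvMaxf m xs = m
        · rw [if_pos h3, if_pos h3]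
          simp [pvFilt, h2]
        · rw [if_neg h3, if_neg h3]
          have hxne : x ≠ pvMaxf m xs := ne_of_lt hxlt
          simp [pvFilt, hxne]

-- ===== VERDICT (by name: the statement is the Claim_ definition above) =====
theorem optimalScores_spec : Claim_equal_optimalScores := by
  intro scores alignments _ hpre
  unfold Spec_optimalScores
  obtain ⟨hne, -⟩ := hpre
  cases scores with
  | nil => exact absurd rfl hne
  | cons s0 rest =>
    have hB : optimalScores_alt (s0 :: rest) alignments
        = optimalScoresAltLoop s0 [] [] (s0 :: rest) alignments := rfl
    unfold optimalScores
    rw [pvMaxLoop_eq, pvCollect_eq, hB, pvAltLoop_char]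
    simp only [List.getD_cons_zero]
    rw [show pvMaxf s0 (s0 :: rest) = pvMaxf s0 rest from by simp [pvMaxf]]
    split_ifs with h
    · simp [h]
    · simp
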